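-- pv_equiv track=rewrite | github.com/palanore1/entity_resolution_chall | entity_resolution.py | are_related_industries
-- ===== SOURCE A (Python) =====
-- def are_related_industries(industry1: str, industry2: str) -> bool:
--     """Check if two industries are related based on predefined hierarchies."""
--     industry_hierarchies = {
--         "Food Service": ["Restaurants", "Cafes", "Food Service"],
--         "Construction": [
--             "General Contractors & Heavy Construction",
--             "Finishing Contractors",
--             "Construction",
--         ],
--         "Real Estate": [
--             "Real Estate - Agents & Managers",
--             "Real Estate",
--             "Property Management",
--         ],
--         "Hospitality": ["Accommodation", "Hotels", "Hospitality"],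
--     }
--
--     for category, industries in industry_hierarchies.items():
--         if industry1 in industries and industry2 in industries:
--             return True
--     return False
-- ===== SOURCE B (Python) =====
-- _CATEGORY = {
--     "Restaurants": "Food Service",
--     "Cafes": "Food Service",
--     "Food Service": "Food Service",
--     "General Contractors & Heavy Construction": "Construction",
--     "Finishing Contractors": "Construction",
--     "Construction": "Construction",
--     "Real Estate - Agents & Managers": "Real Estate",
--     "Real Estate": "Real Estate",
--     "Property Management": "Real Estate",
--     "Accommodation": "Hospitality",
--     "Hotels": "Hospitality",
--     "Hospitality": "Hospitality",
-- }
--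
--
-- def are_related_industries(industry1: str, industry2: str) -> bool:
--     """Check if two industries are related based on predefined hierarchies."""
--     c1 = _CATEGORY.get(industry1)
--     return c1 is not None and c1 == _CATEGORY.get(industry2)
-- ===== Notes on version B (the rewrite author's own statement) =====
-- stated objective: idiomatic
-- what changed: Replaced the loop over categories with two list-membership tests by a precomputed flat name-to-category index consulted with two dict lookups and one equality test (guarding the both-missing case).
import Mathlib
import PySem

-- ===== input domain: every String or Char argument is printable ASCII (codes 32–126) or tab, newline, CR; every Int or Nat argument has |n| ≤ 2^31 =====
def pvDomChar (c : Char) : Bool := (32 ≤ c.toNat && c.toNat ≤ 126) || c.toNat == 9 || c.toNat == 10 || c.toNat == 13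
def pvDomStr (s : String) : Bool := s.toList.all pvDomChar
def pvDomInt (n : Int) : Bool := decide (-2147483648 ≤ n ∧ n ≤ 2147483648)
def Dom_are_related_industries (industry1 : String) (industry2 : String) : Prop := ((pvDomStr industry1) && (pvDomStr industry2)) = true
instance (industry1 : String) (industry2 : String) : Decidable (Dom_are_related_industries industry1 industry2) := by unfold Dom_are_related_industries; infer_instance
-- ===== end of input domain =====

-- B replaces A's loop over categories (two list-membership tests per category) by a precomputed
-- flat name→category index: two dict lookups and one equality test (idiomatic; same cost class).

-- ===== PORT A =====
-- the hardcoded dict literal `industry_hierarchies` (insertion order; keys distinct)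
def industryHierarchies : List (String × List String) :=
  [ ("Food Service", ["Restaurants", "Cafes", "Food Service"]),
    ("Construction", ["General Contractors & Heavy Construction", "Finishing Contractors", "Construction"]),
    ("Real Estate", ["Real Estate - Agents & Managers", "Real Estate", "Property Management"]),
    ("Hospitality", ["Accommodation", "Hotels", "Hospitality"]) ]

-- the `for category, industries in …: if … in … and … in …: return True` loop, early return as recursion
def areRelLoop (industry1 industry2 : String) : List (String × List String) → Bool
  | [] => false
  | (_, industries) :: rest =>
      if industries.contains industry1 && industries.contains industry2 then true
      else areRelLoop industry1 industry2 rest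

def are_related_industries (industry1 : String) (industry2 : String) : Bool :=
  areRelLoop industry1 industry2 industryHierarchies

-- ===== PORT B =====
-- the precomputed flat dict literal `_CATEGORY` of Source B
def categoryIndex : PySem.Dict String String :=
  PySem.Dict.ofList
    [ ("Restaurants", "Food Service"), ("Cafes", "Food Service"), ("Food Service", "Food Service"),
      ("General Contractors & Heavy Construction", "Construction"), ("Finishing Contractors", "Construction"),
      ("Construction", "Construction"),
      ("Real Estate - Agents & Managers", "Real Estate"), ("Real Estate", "Real Estate"),
      ("Property Management", "Real Estate"),
      ("Accommodation", "Hospitality"), ("Hotels", "Hospitality"), ("Hospitality", "Hospitality") ]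

-- `c1 = _CATEGORY.get(industry1); return c1 is not None and c1 == _CATEGORY.get(industry2)`
def are_related_industries_alt (industry1 : String) (industry2 : String) : Bool :=
  match categoryIndex.get? industry1 with
  | none => false
  | some c1 => some c1 == categoryIndex.get? industry2

-- ===== PRECONDITION & SPEC =====
def Spec_are_related_industries (industry1 : String) (industry2 : String) (out : Bool) : Prop := out = are_related_industries_alt industry1 industry2
instance (industry1 : String) (industry2 : String) (out : Bool) : Decidable (Spec_are_related_industries industry1 industry2 out) := by unfold Spec_are_related_industries; infer_instance

-- ===== CLAIM (what is proved, stated in full; the proofs are below) =====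
def Claim_equal_are_related_industries : Prop := ∀ (industry1 : String) (industry2 : String), Dom_are_related_industries industry1 industry2 → Spec_are_related_industries industry1 industry2 (are_related_industries industry1 industry2)

-- ===== LEMMAS AND PROOFS =====

-- `Bad s`: s is none of the twelve industry names in the table
def Bad (s : String) : Prop :=
  s ≠ "Restaurants" ∧ s ≠ "Cafes" ∧ s ≠ "Food Service" ∧
  s ≠ "General Contractors & Heavy Construction" ∧ s ≠ "Finishing Contractors" ∧ s ≠ "Construction" ∧
  s ≠ "Real Estate - Agents & Managers" ∧ s ≠ "Real Estate" ∧ s ≠ "Property Management" ∧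
  s ≠ "Accommodation" ∧ s ≠ "Hotels" ∧ s ≠ "Hospitality"

theorem cases12 (s : String) :
    s = "Restaurants" ∨ s = "Cafes" ∨ s = "Food Service" ∨
    s = "General Contractors & Heavy Construction" ∨ s = "Finishing Contractors" ∨ s = "Construction" ∨
    s = "Real Estate - Agents & Managers" ∨ s = "Real Estate" ∨ s = "Property Management" ∨
    s = "Accommodation" ∨ s = "Hotels" ∨ s = "Hospitality" ∨ Bad s := by
  by_cases h1 : s = "Restaurants"; · exact Or.inl h1
  by_cases h2 : s = "Cafes"; · exact Or.inr (Or.inl h2)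
  by_cases h3 : s = "Food Service"; · tauto
  by_cases h4 : s = "General Contractors & Heavy Construction"; · tauto
  by_cases h5 : s = "Finishing Contractors"; · tauto
  by_cases h6 : s = "Construction"; · tauto
  by_cases h7 : s = "Real Estate - Agents & Managers"; · tauto
  by_cases h8 : s = "Real Estate"; · tauto
  by_cases h9 : s = "Property Management"; · tauto
  by_cases h10 : s = "Accommodation"; · tauto
  by_cases h11 : s = "Hotels"; · tauto
  by_cases h12 : s = "Hospitality"; · tauto
  exact Or.inr (Or.inr (Or.inr (Or.inr (Or.inr (Or.inr (Or.inr (Or.inr (Or.inr (Or.inr (Or.inr (Or.inr ⟨h1,h2,h3,h4,h5,h6,h7,h8,h9,h10,h11,h12⟩)))))))))))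

-- the built index evaluated to its literal association list
theorem catIdx_lit : categoryIndex = PySem.Dict.mk
    [ ("Restaurants", "Food Service"), ("Cafes", "Food Service"), ("Food Service", "Food Service"),
      ("General Contractors & Heavy Construction", "Construction"), ("Finishing Contractors", "Construction"),
      ("Construction", "Construction"),
      ("Real Estate - Agents & Managers", "Real Estate"), ("Real Estate", "Real Estate"),
      ("Property Management", "Real Estate"),
      ("Accommodation", "Hospitality"), ("Hotels", "Hospitality"), ("Hospitality", "Hospitality") ] := by decide

set_option maxHeartbeats 2000000 in
theorem notIn (s : String) (h : Bad s) : categoryIndex.get? s = none := by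
  obtain ⟨h1,h2,h3,h4,h5,h6,h7,h8,h9,h10,h11,h12⟩ := h
  rw [catIdx_lit]
  simp only [PySem.Dict.get?_mk_cons]
  split_ifs <;> simp_all [PySem.Dict.get?]

theorem A_Bad_right (i1 s : String) (h : Bad s) : are_related_industries i1 s = false := by
  obtain ⟨h1,h2,h3,h4,h5,h6,h7,h8,h9,h10,h11,h12⟩ := h
  simp_all [are_related_industries, industryHierarchies, areRelLoop]

theorem A_Bad_left (s i2 : String) (h : Bad s) : are_related_industries s i2 = false := by
  obtain ⟨h1,h2,h3,h4,h5,h6,h7,h8,h9,h10,h11,h12⟩ := h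
  simp_all [are_related_industries, industryHierarchies, areRelLoop]

theorem alt_Bad_right (i1 s : String) (h : Bad s) : are_related_industries_alt i1 s = false := by
  rw [are_related_industries_alt]
  cases categoryIndex.get? i1 <;> simp [notIn s h]

theorem alt_Bad_left (s i2 : String) (h : Bad s) : are_related_industries_alt s i2 = false := by
  rw [are_related_industries_alt, notIn s h]

theorem bothFalse_right (i1 s : String) (h : Bad s) :
    are_related_industries i1 s = are_related_industries_alt i1 s := by
  rw [A_Bad_right i1 s h, alt_Bad_right i1 s h]

theorem bothFalse_left (s i2 : String) (h : Bad s) :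
    are_related_industries s i2 = are_related_industries_alt s i2 := by
  rw [A_Bad_left s i2 h, alt_Bad_left s i2 h]

set_option maxHeartbeats 4000000 in
theorem main_eq (i1 i2 : String) : are_related_industries i1 i2 = are_related_industries_alt i1 i2 := by
  rcases cases12 i1 with h1|h1|h1|h1|h1|h1|h1|h1|h1|h1|h1|h1|h1 <;>
    rcases cases12 i2 with h2|h2|h2|h2|h2|h2|h2|h2|h2|h2|h2|h2|h2 <;>
    first
      | (exact bothFalse_right _ _ h2)
      | (exact bothFalse_left _ _ h1)
      | (subst h1; subst h2; decide)

-- ===== VERDICT (by name: the statement is the Claim_ definition above) =====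
theorem are_related_industries_spec : Claim_equal_are_related_industries := by
  intro i1 i2 _
  exact main_eq i1 i2
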